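-- pv_equiv track=rewrite | github.com/entwickler2/ProjectEuler | problem28.py | diagonal_1
-- ===== SOURCE A (Python) =====
-- def diagonal_1(max_length):
--     i_1 = 0
--     i = 1
--     ind = [0]
--     while True:
--         i_1 = i_1 + i * 2
--         i += 1
--         if i_1 < max_length:
--             ind.append(i_1 + 1)
--         else:
--             break
--     return ind
-- ===== SOURCE B (Python) =====
-- def diagonal_1(max_length):
--     # binary search for the largest n with n*(n+1) < max_length, then emit the
--     # diagonal values k*k + k + 1 directly from the closed form
--     if max_length <= 2:
--         return [0]
--     lo, hi = 1, max_length
--     while hi - lo > 1: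
--         mid = (lo + hi) // 2
--         if mid * (mid + 1) < max_length:
--             lo = mid
--         else:
--             hi = mid
--     return [0] + [k * k + k + 1 for k in range(1, lo + 1)]
-- ===== Notes on version B (the rewrite author's own statement) =====
-- stated objective: alternative
-- what changed: Replaces A's accumulate-and-break while loop by a binary search for the largest n with n*(n+1) < max_length followed by a closed-form comprehension producing each diagonal value directly.
import Mathlib
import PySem

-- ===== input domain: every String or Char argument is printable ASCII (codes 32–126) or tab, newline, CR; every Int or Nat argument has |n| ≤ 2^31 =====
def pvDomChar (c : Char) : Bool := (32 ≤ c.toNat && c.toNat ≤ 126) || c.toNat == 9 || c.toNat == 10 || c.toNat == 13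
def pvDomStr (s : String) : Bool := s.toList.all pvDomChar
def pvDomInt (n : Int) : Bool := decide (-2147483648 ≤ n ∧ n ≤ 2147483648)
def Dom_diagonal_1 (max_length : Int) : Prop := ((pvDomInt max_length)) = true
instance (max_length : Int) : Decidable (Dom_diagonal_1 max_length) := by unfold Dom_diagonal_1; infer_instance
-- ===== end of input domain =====

-- B replaces A's accumulating while loop by a binary search for the last diagonal index
-- plus a closed-form comprehension; same values, no speed claim.

-- ===== PORT A =====
-- A's 'while True' loop; the proof argument 1 ≤ i only guards termination.
def diagonal_1_loop (max_length i_1 i : Int) (ind : List Int) (hi : 1 ≤ i) : List Int :=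
  if _h : i_1 + i * 2 < max_length then
    diagonal_1_loop max_length (i_1 + i * 2) (i + 1) (ind ++ [i_1 + i * 2 + 1]) (by omega)
  else
    ind
termination_by (max_length - i_1).toNat
decreasing_by omega

def diagonal_1 (max_length : Int) : List Int :=
  diagonal_1_loop max_length 0 1 [0] (by norm_num)

-- ===== PORT B =====
def diagonal_1_bs (max_length lo hi : Int) : Int :=
  if _h : hi - lo > 1 then
    if PySem.Int.floordiv (lo + hi) 2 * (PySem.Int.floordiv (lo + hi) 2 + 1) < max_length then
      diagonal_1_bs max_length (PySem.Int.floordiv (lo + hi) 2) hi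
    else
      diagonal_1_bs max_length lo (PySem.Int.floordiv (lo + hi) 2)
  else lo
termination_by (hi - lo).toNat
decreasing_by
  · have h1 : lo + 1 ≤ PySem.Int.floordiv (lo + hi) 2 := by
      rw [PySem.Int.le_floordiv_iff_mul_le (by omega)]; omega
    omega
  · have h2 : PySem.Int.floordiv (lo + hi) 2 < hi := by
      rw [PySem.Int.floordiv_lt_iff_lt_mul (by omega)]; omega
    omega

def diagonal_1_alt (max_length : Int) : List Int :=
  if max_length ≤ 2 then [0]
  else
    [0] ++ (PySem.List.pyRange 1 (diagonal_1_bs max_length 1 max_length + 1) 1).map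
      (fun k => k * k + k + 1)

-- ===== PRECONDITION & SPEC =====
def Spec_diagonal_1 (max_length : Int) (out : List Int) : Prop := out = diagonal_1_alt max_length
instance (max_length : Int) (out : List Int) : Decidable (Spec_diagonal_1 max_length out) := by unfold Spec_diagonal_1; infer_instance

-- ===== CLAIM (what is proved, stated in full; the proofs are below) =====
def Claim_equal_diagonal_1 : Prop := ∀ (max_length : Int), Dom_diagonal_1 max_length → Spec_diagonal_1 max_length (diagonal_1 max_length)

-- ===== LEMMAS AND PROOFS =====

-- binary search invariant: the result n satisfies lo ≤ n, n*(n+1) < m and m ≤ (n+1)*(n+2)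
theorem diagonal_1_bs_spec (m lo hi : Int) (h1 : lo * (lo + 1) < m)
    (h2 : m ≤ hi * (hi + 1)) (h3 : lo < hi) :
    lo ≤ diagonal_1_bs m lo hi ∧
    diagonal_1_bs m lo hi * (diagonal_1_bs m lo hi + 1) < m ∧
    m ≤ (diagonal_1_bs m lo hi + 1) * (diagonal_1_bs m lo hi + 2) := by
  rw [diagonal_1_bs]
  split
  · next hgap =>
    have hmidlo : lo + 1 ≤ PySem.Int.floordiv (lo + hi) 2 := by
      rw [PySem.Int.le_floordiv_iff_mul_le (by omega)]; omega
    have hmidhi : PySem.Int.floordiv (lo + hi) 2 < hi := by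
      rw [PySem.Int.floordiv_lt_iff_lt_mul (by omega)]; omega
    split
    · next hlt =>
      have := diagonal_1_bs_spec m (PySem.Int.floordiv (lo + hi) 2) hi hlt h2 (by omega)
      exact ⟨by omega, this.2⟩
    · next hge =>
      exact diagonal_1_bs_spec m lo (PySem.Int.floordiv (lo + hi) 2) h1
        (by omega) (by omega)
  · next hgap =>
    have : hi = lo + 1 := by omega
    subst this
    exact ⟨le_refl _, h1, by linarith⟩
termination_by (hi - lo).toNat
decreasing_by
  · have h1' : lo + 1 ≤ PySem.Int.floordiv (lo + hi) 2 := by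
      rw [PySem.Int.le_floordiv_iff_mul_le (by omega)]; omega
    omega
  · have h2' : PySem.Int.floordiv (lo + hi) 2 < hi := by
      rw [PySem.Int.floordiv_lt_iff_lt_mul (by omega)]; omega
    omega

-- A's loop, started at i with accumulator (i-1)*i, appends exactly the closed-form
-- values k*k+k+1 for k = i .. n, where n bounds the last index below the limit.
theorem diagonal_1_loop_eq (m n : Int) (hn1 : n * (n + 1) < m) (hn2 : m ≤ (n + 1) * (n + 2))
    (i : Int) (hi : 1 ≤ i) (hin : i ≤ n + 1) (ind : List Int) :
    diagonal_1_loop m ((i - 1) * i) i ind hi =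
      ind ++ (PySem.List.pyRange i (n + 1) 1).map (fun k => k * k + k + 1) := by
  rw [diagonal_1_loop]
  by_cases hcase : i ≤ n
  · have hlt : (i - 1) * i + i * 2 < m := by nlinarith
    simp only [hlt, dif_pos]
    have heq : (i - 1) * i + i * 2 = ((i + 1) - 1) * (i + 1) := by ring
    rw [heq, diagonal_1_loop_eq m n hn1 hn2 (i + 1) (by omega) (by omega)]
    rw [PySem.List.pyRange_one_cons (show i < n + 1 by omega)]
    have hval : (i + 1 - 1) * (i + 1) + 1 = i * i + i + 1 := by ring
    simp only [List.map_cons, List.append_assoc, List.singleton_append, hval]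
  · have hieq : i = n + 1 := by omega
    have hge : ¬ ((i - 1) * i + i * 2 < m) := by
      subst hieq; push_neg; nlinarith
    simp only [hge, dif_neg, not_false_iff]
    rw [PySem.List.pyRange_one_eq_nil (by omega)]
    simp
termination_by (n + 1 - i).toNat
decreasing_by omega

-- ===== VERDICT (by name: the statement is the Claim_ definition above) =====
theorem diagonal_1_spec : Claim_equal_diagonal_1 := by
  intro m _
  unfold Spec_diagonal_1 diagonal_1 diagonal_1_alt
  by_cases hm : m ≤ 2
  · have h2 : ¬ ((0 : Int) + 1 * 2 < m) := by omega
    rw [diagonal_1_loop]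
    simp [hm]
  · rw [if_neg hm]
    push_neg at hm
    obtain ⟨hlo, hbd1, hbd2⟩ := diagonal_1_bs_spec m 1 m (by omega) (by nlinarith) (by omega)
    have h0 : (0 : Int) = ((1 : Int) - 1) * 1 := by ring
    rw [h0, diagonal_1_loop_eq m (diagonal_1_bs m 1 m) hbd1 hbd2 1 (by norm_num) (by omega)]
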